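-- pv_equiv track=rewrite | github.com/Ibrmustafayev/Python-Projects | PasswordApp/PasswordApp.py | check_sequential
-- ===== SOURCE A (Python) =====
-- SEQUENTIAL_CHARS = [
--     "abcdefghijklmnopqrstuvwxyz",
--     "zyxwvutsrqponmlkjihgfedcba",
--     "0123456789", "9876543210",
-- ]
--
-- def check_sequential(password):
--     """Return length of longest sequential pattern."""
--     pwd_lower = password.lower()
--     for seq in SEQUENTIAL_CHARS:
--         for length in range(min(len(pwd_lower), len(seq)), 3, -1):
--             for i in range(len(seq) - length + 1):
--                 if seq[i:i+length] in pwd_lower: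
--                     return length
--     return 0
-- ===== SOURCE B (Python) =====
-- SEQUENTIAL_CHARS = [
--     "abcdefghijklmnopqrstuvwxyz",
--     "zyxwvutsrqponmlkjihgfedcba",
--     "0123456789", "9876543210",
-- ]
--
-- # per sequence: the set of adjacent character pairs, and the set of its characters
-- _SEQ_DATA = [(seq, set(zip(seq, seq[1:])), set(seq)) for seq in SEQUENTIAL_CHARS]
--
-- def check_sequential(password):
--     """Return length of longest sequential pattern (one linear scan per sequence)."""
--     pwd_lower = password.lower()
--     for seq, pairs, chars in _SEQ_DATA:
--         best = run = 0
--         prev = None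
--         for c in pwd_lower:
--             if prev is not None and (prev, c) in pairs:
--                 run += 1
--             else:
--                 run = 1 if c in chars else 0
--             if run > best:
--                 best = run
--             prev = c
--         if best > 3:
--             return best
--     return 0
-- ===== Notes on version B (the rewrite author's own statement) =====
-- stated objective: faster
-- what changed: A tests every window of every sequence against the password with a substring search at every length from min(len,26) down to 4; B instead makes a single left-to-right pass over the password per sequence, tracking the length of the current run of adjacent sequence characters (precomputed pair/character sets) and its maximum, and returns the first sequence's maximum if it exceeds 3.
import Mathlib
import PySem

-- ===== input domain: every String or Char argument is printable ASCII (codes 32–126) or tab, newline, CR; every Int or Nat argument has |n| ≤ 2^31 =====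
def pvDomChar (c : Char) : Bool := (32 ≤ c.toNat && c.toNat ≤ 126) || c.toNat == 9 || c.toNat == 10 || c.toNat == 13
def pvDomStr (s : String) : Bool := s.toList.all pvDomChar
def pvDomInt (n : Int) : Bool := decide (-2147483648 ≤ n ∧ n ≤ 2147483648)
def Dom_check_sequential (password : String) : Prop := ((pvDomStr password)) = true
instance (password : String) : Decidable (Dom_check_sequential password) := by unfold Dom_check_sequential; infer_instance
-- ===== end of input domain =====

-- B replaces A's three nested loops (every window of every sequence, each tested with a
-- substring search over the password) by one left-to-right scan of the password per sequence
-- that tracks the current consecutive run and its maximum; objective: faster.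

-- the module constant SEQUENTIAL_CHARS, shared by both programs
def SEQUENTIAL_CHARS : List (List Char) :=
  ["abcdefghijklmnopqrstuvwxyz".toList,
   "zyxwvutsrqponmlkjihgfedcba".toList,
   "0123456789".toList, "9876543210".toList]

-- ===== PORT A =====
-- inner loop: for i in range(len(seq) - length + 1): if seq[i:i+length] in pwd_lower: return length
def pvILoop (pwd seq : List Char) (length : Nat) (i : Nat) : Option Int :=
  if _h : i < seq.length - length + 1 then
    if PySem.Chars.isIn (PySem.List.slice seq (some (i : Int)) (some ((i : Int) + (length : Int)))) pwd then
      some (length : Int)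
    else pvILoop pwd seq length (i + 1)
  else none
  termination_by seq.length - length + 1 - i

-- middle loop: for length in range(min(len(pwd_lower), len(seq)), 3, -1): …
def pvLenLoop (pwd seq : List Char) (length : Nat) : Option Int :=
  if 3 < length then
    match pvILoop pwd seq length 0 with
    | some r => some r
    | none => pvLenLoop pwd seq (length - 1)
  else none

def check_sequential (password : String) : Int :=
  let pwdL := (PySem.Str.lower password).toList
  match SEQUENTIAL_CHARS.findSome? (fun seq => pvLenLoop pwdL seq (min pwdL.length seq.length)) with
  | some l => l
  | none => 0

-- ===== PORT B =====
-- set(zip(seq, seq[1:])) : the adjacent pairs of seq, as a Python set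
def pvPairs (seq : List Char) : PySem.Set (Char × Char) :=
  PySem.Set.ofList (seq.zip (PySem.List.slice seq (some 1) none))

-- set(seq)
def pvChars (seq : List Char) : PySem.Set Char := PySem.Set.ofList seq

-- _SEQ_DATA = [(seq, set(zip(seq, seq[1:])), set(seq)) for seq in SEQUENTIAL_CHARS]
def pvSeqData : List (List Char × PySem.Set (Char × Char) × PySem.Set Char) :=
  SEQUENTIAL_CHARS.map (fun seq => (seq, pvPairs seq, pvChars seq))

-- one step of B's scan: state (best, run, prev); '(prev, c) in pairs' / 'c in chars'
def pvStep (pairs : PySem.Set (Char × Char)) (chars : PySem.Set Char)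
    (st : Nat × Nat × Option Char) (c : Char) : Nat × Nat × Option Char :=
  let run :=
    match st.2.2 with
    | some p => if PySem.Set.contains pairs (p, c) then st.2.1 + 1
                else if PySem.Set.contains chars c then 1 else 0
    | none => if PySem.Set.contains chars c then 1 else 0
  (max st.1 run, run, some c)

-- for c in pwd_lower: …  (best = running maximum of run)
def pvScan (seq pwd : List Char) : Nat × Nat × Option Char :=
  pwd.foldl (pvStep (pvPairs seq) (pvChars seq)) (0, 0, none)

def check_sequential_alt (password : String) : Int :=
  let pwdL := (PySem.Str.lower password).toList
  match pvSeqData.findSome? (fun d =>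
      let best := (pvScan d.1 pwdL).1
      if 3 < best then some (best : Int) else none) with
  | some l => l
  | none => 0

-- ===== PRECONDITION & SPEC =====
def Spec_check_sequential (password : String) (out : Int) : Prop := out = check_sequential_alt password
instance (password : String) (out : Int) : Decidable (Spec_check_sequential password out) := by unfold Spec_check_sequential; infer_instance

-- ===== CLAIM (what is proved, stated in full; the proofs are below) =====
def Claim_equal_check_sequential : Prop := ∀ (password : String), Dom_check_sequential password → Spec_check_sequential password (check_sequential password)

-- ===== LEMMAS AND PROOFS =====

theorem midEq (p : Char) : ∀ (x x' y y' : List Char), p ∉ x → p ∉ x' → x ++ p :: y = x' ++ p :: y' → x = x' ∧ y = y'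
  | [], [], y, y', _, _, he => by simpa using he
  | [], a' :: x', y, y', _, hp', he => by
      simp at he; exact absurd (he.1 ▸ List.mem_cons_self) hp'
  | a :: x, [], y, y', hp, _, he => by
      simp at he; exact absurd (he.1 ▸ List.mem_cons_self) hp
  | a :: x, a' :: x', y, y', hp, hp', he => by
      simp at he
      obtain ⟨h1, h2⟩ := midEq p x x' y y' (fun h => hp (List.mem_cons_of_mem _ h)) (fun h => hp' (List.mem_cons_of_mem _ h)) he.2
      exact ⟨by simp [he.1, h1], h2⟩

theorem nodup_mid_eq {x x' y y' : List Char} {p : Char} (h : (x ++ p :: y).Nodup) (he : x ++ p :: y = x' ++ p :: y') : x = x' ∧ y = y' := by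
  have hpx : p ∉ x := by
    intro hm; rw [List.nodup_append] at h
    exact h.2.2 p hm p List.mem_cons_self rfl
  have hpx' : p ∉ x' := by
    rw [he, List.nodup_append] at h
    intro hm; exact h.2.2 p hm p List.mem_cons_self rfl
  exact midEq p x x' y y' hpx hpx' he

theorem infix_ext {seq w : List Char} {p c : Char} (hnd : seq.Nodup)
    (h1 : w ++ [p] <:+: seq) (h2 : [p, c] <:+: seq) : w ++ [p, c] <:+: seq := by
  obtain ⟨s, t, hst⟩ := h1
  obtain ⟨s', t', hst'⟩ := h2
  have he : (s ++ w) ++ p :: t = s' ++ p :: (c :: t') := by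
    rw [← hst'] at hst; simpa [List.append_assoc] using hst
  have h' : ((s ++ w) ++ p :: t).Nodup := by rw [← hst] at hnd; simpa [List.append_assoc] using hnd
  obtain ⟨h3, h4⟩ := nodup_mid_eq h' he
  refine ⟨s, t', ?_⟩
  rw [← hst]
  simp [h4, List.append_assoc]

theorem infix_concat_cases {w l : List Char} {c : Char} (h : w <:+: l ++ [c]) : w <:+: l ∨ w <:+ (l ++ [c]) := by
  obtain ⟨s, t, hst⟩ := h
  rcases List.eq_nil_or_concat t with rfl | ⟨t', d, rfl⟩
  · right; exact ⟨s, by simpa using hst⟩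
  · left
    have h2 : (s ++ (w ++ t')) ++ [d] = l ++ [c] := by
      simpa [List.append_assoc] using hst
    have h3 := (List.append_inj' h2 (by simp)).1
    exact ⟨s, t', by simpa [List.append_assoc] using h3⟩

theorem suffix_concat_cases {w l : List Char} {c : Char} (h : w <:+ l ++ [c]) :
    w = [] ∨ ∃ w', w = w' ++ [c] ∧ w' <:+ l := by
  obtain ⟨s, hs⟩ := h
  rcases List.eq_nil_or_concat w with rfl | ⟨w', d, rfl⟩
  · exact Or.inl rfl
  · right
    have h2 : (s ++ w') ++ [d] = l ++ [c] := by simpa [List.append_assoc] using hs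
    obtain ⟨h3, h4⟩ := List.append_inj' h2 (by simp)
    have hd : d = c := by simpa using h4
    exact ⟨w', by simp [hd], ⟨s, h3⟩⟩

-- longest suffix of cs that is an infix of seq

def RunS (seq cs : List Char) (r : Nat) : Prop :=
  (∃ w, w.length = r ∧ w <:+: seq ∧ w <:+ cs) ∧ ∀ w, w <:+: seq → w <:+ cs → w.length ≤ r

-- longest infix of cs that is an infix of seq

def BestS (seq cs : List Char) (b : Nat) : Prop :=
  (∃ w, w.length = b ∧ w <:+: seq ∧ w <:+: cs) ∧ ∀ w, w <:+: seq → w <:+: cs → w.length ≤ b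

theorem run_step {seq cs : List Char} {c : Char} {r : Nat} (hnd : seq.Nodup) (hr : RunS seq cs r) :
    RunS seq (cs ++ [c])
      (match cs.getLast? with
       | some p => if [p, c] <:+: seq then r + 1 else if c ∈ seq then 1 else 0
       | none => if c ∈ seq then 1 else 0) := by
  obtain ⟨⟨w, hwlen, hwseq, hwsuf⟩, hmax⟩ := hr
  rcases List.eq_nil_or_concat cs with rfl | ⟨ds, p, rfl⟩
  · -- cs = []
    simp only [List.getLast?_nil]
    constructor
    · by_cases hc : c ∈ seq
      · exact ⟨[c], by simp [hc], by simp [List.singleton_infix_iff, hc], by simp⟩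
      · exact ⟨[], by simp [hc]⟩
    · intro v hvseq hvsuf
      rcases suffix_concat_cases hvsuf with rfl | ⟨v', rfl, hv'⟩
      · simp
      · have : v' = [] := List.eq_nil_of_suffix_nil (by simpa using hv')
        subst this
        have hc : c ∈ seq := (List.singleton_infix_iff c seq).mp (by simpa using hvseq)
        simp [hc]
  · -- cs = ds ++ [p] (continued)
    simp only [List.concat_eq_append] at hmax hwsuf ⊢
    rw [List.getLast?_concat]
    have hlast : ∀ v, v <:+ ds ++ [p] → v ≠ [] → ∃ v', v = v' ++ [p] ∧ v' <:+ ds := by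
      intro v hv hne
      rcases suffix_concat_cases hv with rfl | h
      · exact absurd rfl hne
      · exact h
    by_cases hpc : [p, c] <:+: seq
    · simp only [if_pos hpc]
      -- r ≥ 1 since [p] is a suffix of cs and infix of seq
      have hp_seq : [p] <:+: seq := ((List.prefix_append [p] [c]).isInfix).trans hpc
      have hr1 : 1 ≤ r := hmax [p] hp_seq (List.suffix_append ds [p])
      -- witness w ends with p
      have hwne : w ≠ [] := by intro h; subst h; simp at hwlen; omega
      obtain ⟨w', rfl, hw'⟩ := hlast w hwsuf hwne
      constructor
      · refine ⟨w' ++ [p, c], by simp at hwlen ⊢; omega, infix_ext hnd hwseq hpc, ?_⟩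
        obtain ⟨s, hs⟩ := hwsuf
        exact ⟨s, by rw [show w' ++ [p, c] = (w' ++ [p]) ++ [c] by simp, ← List.append_assoc, hs]⟩
      · intro v hvseq hvsuf
        rcases suffix_concat_cases hvsuf with rfl | ⟨v', rfl, hv'⟩
        · simp
        · have hv'seq : v' <:+: seq := ((List.prefix_append v' [c]).isInfix).trans hvseq
          have := hmax v' hv'seq hv'
          simpa using by omega
    · simp only [if_neg hpc]
      constructor
      · by_cases hc : c ∈ seq
        · exact ⟨[c], by simp [hc], by simp [List.singleton_infix_iff, hc], ⟨ds ++ [p], by simp⟩⟩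
        · exact ⟨[], by simp [hc]⟩
      · intro v hvseq hvsuf
        rcases suffix_concat_cases hvsuf with rfl | ⟨v', rfl, hv'⟩
        · simp
        · rcases List.eq_nil_or_concat v' with rfl | ⟨v'', q, rfl⟩
          · have hc : c ∈ seq := (List.singleton_infix_iff c seq).mp (by simpa using hvseq)
            simp [hc]
          · -- v = v'' ++ [q, c] infix of seq, q = p (last of ds ++ [p])
            simp only [List.concat_eq_append] at hvseq hvsuf
            have hq : q = p := by
              obtain ⟨s, hs⟩ := hv'
              have h2 : (s ++ v'') ++ [q] = ds ++ [p] := by simpa [List.append_assoc, List.concat_eq_append] using hs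
              simpa using (List.append_inj' h2 (by simp)).2
            rw [hq] at hvseq
            have : [p, c] <:+: seq := by
              have h1 : [p, c] <:+ (v'' ++ [p]) ++ [c] := by simp
              have h2 : (v'' ++ [p]) ++ [c] <:+: seq := by simpa [List.append_assoc] using hvseq
              exact h1.isInfix.trans h2
            exact absurd this hpc

theorem best_step {seq cs : List Char} {c : Char} {b r' : Nat}
    (hb : BestS seq cs b) (hr' : RunS seq (cs ++ [c]) r') : BestS seq (cs ++ [c]) (max b r') := by
  obtain ⟨⟨w, hwlen, hwseq, hwinf⟩, hbmax⟩ := hb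
  obtain ⟨⟨v, hvlen, hvseq, hvsuf⟩, hrmax⟩ := hr'
  constructor
  · rcases Nat.le_total r' b with h | h
    · exact ⟨w, by omega, hwseq, hwinf.trans (List.prefix_append cs [c]).isInfix⟩
    · exact ⟨v, by omega, hvseq, hvsuf.isInfix⟩
  · intro u huseq huinf
    rcases infix_concat_cases huinf with h | h
    · exact le_trans (hbmax u huseq h) (Nat.le_max_left _ _)
    · exact le_trans (hrmax u huseq h) (Nat.le_max_right _ _)

theorem zip_adj {p c : Char} : ∀ seq : List Char, (p, c) ∈ seq.zip seq.tail ↔ [p, c] <:+: seq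
  | [] => by simp
  | [a] => by
      simp only [List.zip_nil_right, List.tail_cons, List.not_mem_nil, false_iff]
      intro h
      have := h.length_le
      simp at this
  | a :: b :: t => by
      rw [List.infix_cons_iff]
      constructor
      · rintro h
        simp only [List.tail_cons, List.zip_cons_cons, List.mem_cons, Prod.mk.injEq] at h
        rcases h with ⟨rfl, rfl⟩ | h
        · exact Or.inl (by simp)
        · exact Or.inr ((zip_adj (b :: t)).mp (by simpa using h))
      · rintro (h | h)
        · rcases List.cons_prefix_cons.mp h with ⟨rfl, h2⟩
          rcases List.cons_prefix_cons.mp h2 with ⟨rfl, _⟩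
          simp
        · have := (zip_adj (b :: t)).mpr h
          simp only [List.tail_cons, List.zip_cons_cons, List.mem_cons]
          exact Or.inr (by simpa using this)

theorem mem_pairs_iff {p c : Char} {seq : List Char} :
    (p, c) ∈ pvPairs seq ↔ [p, c] <:+: seq := by
  rw [pvPairs, PySem.List.slice_from_one, PySem.Set.mem_ofList]
  exact zip_adj seq

theorem mem_chars_iff {c : Char} {seq : List Char} :
    c ∈ pvChars seq ↔ c ∈ seq := by
  rw [pvChars, PySem.Set.mem_ofList]

theorem scan_spec {seq : List Char} (hnd : seq.Nodup) (cs : List Char) :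
    (pvScan seq cs).2.2 = cs.getLast? ∧ RunS seq cs (pvScan seq cs).2.1 ∧ BestS seq cs (pvScan seq cs).1 := by
  induction cs using List.reverseRecOn with
  | nil =>
      refine ⟨rfl, ⟨⟨[], by simp [pvScan]⟩, ?_⟩, ⟨⟨[], by simp [pvScan]⟩, ?_⟩⟩
      · intro w _ hw; simp [List.eq_nil_of_suffix_nil hw]
      · intro w _ hw; simp [List.eq_nil_of_infix_nil hw]
  | append_singleton cs c ih =>
      obtain ⟨ihlast, ihrun, ihbest⟩ := ih
      have hstep : pvScan seq (cs ++ [c]) = pvStep (pvPairs seq) (pvChars seq) (pvScan seq cs) c := by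
        simp [pvScan, List.foldl_append]
      have hrun' : (pvStep (pvPairs seq) (pvChars seq) (pvScan seq cs) c).2.1 =
          (match cs.getLast? with
           | some p => if [p, c] <:+: seq then (pvScan seq cs).2.1 + 1 else if c ∈ seq then 1 else 0
           | none => if c ∈ seq then 1 else 0) := by
        rw [pvStep, ihlast]
        cases cs.getLast? with
        | none =>
            by_cases hc : c ∈ seq
            · simp [mem_chars_iff, hc]
            · simp [mem_chars_iff, hc]
        | some p =>
            by_cases hpc : [p, c] <:+: seq
            · simp [mem_pairs_iff, hpc]
            · by_cases hc : c ∈ seq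
              · simp [mem_pairs_iff, mem_chars_iff, hpc, hc]
              · simp [mem_pairs_iff, mem_chars_iff, hpc, hc]
      have hrun : RunS seq (cs ++ [c]) (pvScan seq (cs ++ [c])).2.1 := by
        rw [hstep, hrun']
        exact run_step hnd ihrun
      refine ⟨by rw [hstep]; simp [pvStep], hrun, ?_⟩
      have hbest : (pvScan seq (cs ++ [c])).1 = max (pvScan seq cs).1 (pvScan seq (cs ++ [c])).2.1 := by
        rw [hstep]; simp [pvStep]
      rw [hbest]
      exact best_step ihbest hrun

theorem slice_window (seq : List Char) (i L : Nat) :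
    PySem.List.slice seq (some (i : Int)) (some ((i : Int) + (L : Int))) = (seq.drop i).take L :=
  PySem.List.slice_natCast_add seq i L

theorem iLoop_spec (pwd seq : List Char) (L : Nat) : ∀ i,
    (pvILoop pwd seq L i = none ↔ ∀ j, i ≤ j → j < seq.length - L + 1 → ¬((seq.drop j).take L <:+: pwd)) ∧
    (∀ x, pvILoop pwd seq L i = some x → x = (L : Int)) := by
  have main : ∀ k i, seq.length - L + 1 - i ≤ k →
      ((pvILoop pwd seq L i = none ↔ ∀ j, i ≤ j → j < seq.length - L + 1 → ¬((seq.drop j).take L <:+: pwd)) ∧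
       (∀ x, pvILoop pwd seq L i = some x → x = (L : Int))) := by
    intro k
    induction k with
    | zero =>
        intro i hk
        have hge : ¬ (i < seq.length - L + 1) := by omega
        rw [pvILoop, dif_neg hge]
        exact ⟨⟨fun _ j hij hj hc => absurd (by omega : i < seq.length - L + 1) hge, fun _ => rfl⟩,
               fun x hx => by simp at hx⟩
    | succ k ih =>
        intro i hk
        rw [pvILoop]
        split
        · rename_i h
          rw [slice_window] at *
          by_cases hin : (seq.drop i).take L <:+: pwd
          · rw [if_pos ((PySem.Chars.isIn_iff_infix _ _).mpr hin)]
            constructor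
            · constructor
              · intro hc; exact absurd hc (by simp)
              · intro hall; exact absurd hin (hall i le_rfl h)
            · intro x hx; simpa using hx.symm
          · rw [if_neg (by simpa using (PySem.Chars.isIn_eq_false_iff _ _).mpr hin)]
            obtain ⟨ih1, ih2⟩ := ih (i + 1) (by omega)
            refine ⟨?_, ih2⟩
            rw [ih1]
            constructor
            · intro hall j hij hj
              rcases Nat.eq_or_lt_of_le hij with rfl | hlt
              · exact hin
              · exact hall j hlt hj
            · intro hall j hij hj; exact hall j (by omega) hj
        · rename_i h
          exact ⟨⟨fun _ j hij hj hc => absurd (by omega : i < seq.length - L + 1) h, fun _ => rfl⟩,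
                 fun x hx => by simp at hx⟩
  exact fun i => main (seq.length - L + 1) i (by omega)

theorem window_exists {seq pwd : List Char} {b L : Nat} (hb : BestS seq pwd b) (hL : L ≤ b) :
    ∃ j : Nat, j + L ≤ seq.length ∧ (seq.drop j).take L <:+: pwd := by
  obtain ⟨⟨w, hwlen, hwseq, hwpwd⟩, _⟩ := hb
  obtain ⟨s, t, hst⟩ := (List.take_prefix L w).isInfix.trans hwseq
  refine ⟨s.length, ?_, ?_⟩
  · have := congrArg List.length hst
    simp at this
    omega
  · have hdrop : seq.drop s.length = w.take L ++ t := by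
      rw [← hst]; simp
    have htk : (seq.drop s.length).take L = w.take L := by
      rw [hdrop, List.take_append_of_le_length (by simp; omega), List.take_take]
      simp
    rw [htk]
    exact (List.take_prefix L w).isInfix.trans hwpwd

theorem window_le {seq pwd : List Char} {b L j : Nat} (hb : BestS seq pwd b)
    (hj : j + L ≤ seq.length) (hw : (seq.drop j).take L <:+: pwd) : L ≤ b := by
  have hinf : (seq.drop j).take L <:+: seq :=
    (List.take_prefix L (seq.drop j)).isInfix.trans (seq.drop_suffix j).isInfix
  have hlen : ((seq.drop j).take L).length = L := by simp; omega
  have := hb.2 _ hinf hw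
  omega

theorem lenLoop_eq {pwd seq : List Char} {b : Nat} (hb : BestS seq pwd b) :
    ∀ m : Nat, b ≤ m → m ≤ pwd.length → m ≤ seq.length →
    pvLenLoop pwd seq m = if 3 < b then some (b : Int) else none := by
  intro m
  induction m with
  | zero =>
      intro hbm _ _
      rw [pvLenLoop, if_neg (by omega), if_neg (by omega)]
  | succ m ih =>
      intro hbm hmp hms
      by_cases h3 : 3 < m + 1
      · rw [pvLenLoop, if_pos h3]
        obtain ⟨hnone, hsome⟩ := iLoop_spec pwd seq (m + 1) 0
        rcases Nat.eq_or_lt_of_le hbm with hbe | hblt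
        · -- b = m + 1 : the inner loop finds a window
          obtain ⟨j, hj, hwin⟩ := window_exists hb (le_of_eq hbe.symm)
          have hne : pvILoop pwd seq (m + 1) 0 ≠ none := by
            rw [ne_eq, hnone]
            push Not
            exact ⟨j, Nat.zero_le j, by omega, hwin⟩
          cases hx : pvILoop pwd seq (m + 1) 0 with
          | none => exact absurd hx hne
          | some x =>
              rw [hsome x hx, if_pos (by omega)]
              simp [← hbe]
        · -- b ≤ m : no window of length m+1, recurse
          have hisnone : pvILoop pwd seq (m + 1) 0 = none := by
            rw [hnone]
            intro j _ hj hwin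
            have := window_le hb (by omega : j + (m + 1) ≤ seq.length) hwin
            omega
          rw [hisnone]
          simpa using ih (by omega) (by omega) (by omega)
      · rw [pvLenLoop, if_neg h3, if_neg (by omega)]

theorem seq_lemma {seq : List Char} (hnd : seq.Nodup) (pwd : List Char) :
    pvLenLoop pwd seq (min pwd.length seq.length) =
      (if 3 < (pvScan seq pwd).1 then some (((pvScan seq pwd).1 : Nat) : Int) else none) := by
  obtain ⟨-, -, hbest⟩ := scan_spec hnd pwd
  have hle_p : (pvScan seq pwd).1 ≤ pwd.length := by
    obtain ⟨⟨w, hwlen, _, hwpwd⟩, -⟩ := hbest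
    have := hwpwd.length_le; omega
  have hle_s : (pvScan seq pwd).1 ≤ seq.length := by
    obtain ⟨⟨w, hwlen, hwseq, -⟩, -⟩ := hbest
    have := hwseq.length_le; omega
  exact lenLoop_eq hbest _ (by omega) (by omega) (by omega)

theorem pv_findSome_congr {α β : Type} (f g : α → Option β) :
    ∀ l : List α, (∀ a ∈ l, f a = g a) → l.findSome? f = l.findSome? g := by
  intro l
  induction l with
  | nil => intro _; rfl
  | cons a l ih =>
      intro h
      rw [List.findSome?_cons, List.findSome?_cons, h a List.mem_cons_self,
          ih (fun b hb => h b (List.mem_cons_of_mem a hb))]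

theorem pv_nodup : ∀ seq ∈ SEQUENTIAL_CHARS, seq.Nodup := by decide

theorem check_eq (password : String) : check_sequential password = check_sequential_alt password := by
  simp only [check_sequential, check_sequential_alt, pvSeqData, List.findSome?_map]
  rw [pv_findSome_congr _ _ SEQUENTIAL_CHARS
    (fun seq hs => seq_lemma (pv_nodup seq hs) ((PySem.Str.lower password).toList))]
  rfl

-- ===== VERDICT (by name: the statement is the Claim_ definition above) =====
theorem check_sequential_spec : Claim_equal_check_sequential :=
  fun password _ => check_eq password
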